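-- pv_equiv track=rewrite | github.com/rzeta-10/CA | tutorial_1/gui.py | generate_temporal_accesses
-- ===== SOURCE A (Python) =====
-- def generate_temporal_accesses(num_accesses, base_addresses_blocks=[0, 1, 2], repeat_pattern=[1, 1, 1, 2, 2, 3]):
--     access_sequence = []
--     pattern_len = len(repeat_pattern)
--     base_len = len(base_addresses_blocks)
--     for i in range(num_accesses):
--         base_index = repeat_pattern[i % pattern_len] - 1
--         access_sequence.append(base_addresses_blocks[base_index % base_len])
--     return access_sequence
-- ===== SOURCE B (Python) =====
-- def generate_temporal_accesses(num_accesses, base_addresses_blocks=[0, 1, 2], repeat_pattern=[1, 1, 1, 2, 2, 3]):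
--     if num_accesses <= 0:
--         return []
--     base_len = len(base_addresses_blocks)
--     period = [base_addresses_blocks[(p - 1) % base_len] for p in repeat_pattern]
--     full, rem = divmod(num_accesses, len(repeat_pattern))
--     return period * full + period[:rem]
-- ===== Notes on version B (the rewrite author's own statement) =====
-- stated objective: alternative
-- what changed: Instead of computing an index lookup for every output position in a loop, B builds one period of pattern_len lookups and tiles it to the requested length with list replication plus a prefix slice.
import Mathlib
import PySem

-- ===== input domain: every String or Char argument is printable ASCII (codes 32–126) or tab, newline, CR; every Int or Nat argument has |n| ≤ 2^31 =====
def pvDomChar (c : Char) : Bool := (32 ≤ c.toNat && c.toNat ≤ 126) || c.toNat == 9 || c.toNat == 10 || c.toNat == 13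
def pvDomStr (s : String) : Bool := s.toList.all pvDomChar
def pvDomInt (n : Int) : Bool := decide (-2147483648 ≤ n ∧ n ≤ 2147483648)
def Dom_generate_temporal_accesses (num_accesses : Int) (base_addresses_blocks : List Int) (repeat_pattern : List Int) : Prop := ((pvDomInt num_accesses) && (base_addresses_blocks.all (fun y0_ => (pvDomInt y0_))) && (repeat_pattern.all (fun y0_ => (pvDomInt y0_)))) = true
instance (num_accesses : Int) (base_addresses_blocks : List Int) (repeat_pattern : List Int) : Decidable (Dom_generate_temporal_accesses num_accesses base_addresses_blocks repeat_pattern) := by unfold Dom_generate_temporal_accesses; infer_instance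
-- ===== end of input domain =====

-- B builds one period of lookups and tiles it by replication instead of indexing per output element.

-- ===== PORT A =====
def generate_temporal_accesses (num_accesses : Int) (base_addresses_blocks : List Int) (repeat_pattern : List Int) : List Int :=
  let pattern_len : Int := repeat_pattern.length
  let base_len : Int := base_addresses_blocks.length
  (PySem.List.pyRange 0 num_accesses 1).foldl (fun access_sequence i =>
    let base_index := PySem.List.pyGetD repeat_pattern (PySem.Int.mod i pattern_len) 0 - 1
    access_sequence ++ [PySem.List.pyGetD base_addresses_blocks (PySem.Int.mod base_index base_len) 0]) []

-- ===== PORT B =====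
def generate_temporal_accesses_alt (num_accesses : Int) (base_addresses_blocks : List Int) (repeat_pattern : List Int) : List Int :=
  if num_accesses ≤ 0 then []
  else
    let base_len : Int := base_addresses_blocks.length
    let period := repeat_pattern.map (fun p => PySem.List.pyGetD base_addresses_blocks (PySem.Int.mod (p - 1) base_len) 0)
    let full := PySem.Int.floordiv num_accesses (repeat_pattern.length : Int)
    let rem := PySem.Int.mod num_accesses (repeat_pattern.length : Int)
    -- period * full is (List.replicate full.toNat period).flatten; period[:rem] with 0 ≤ rem is List.take rem.toNat
    (List.replicate full.toNat period).flatten ++ period.take rem.toNat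

-- ===== PRECONDITION & SPEC =====
-- Pre_ excludes exactly the inputs where A raises ZeroDivisionError: num_accesses > 0 with an empty
-- repeat_pattern or empty base_addresses_blocks (i % 0). B raises there too.
def Pre_generate_temporal_accesses (num_accesses : Int) (base_addresses_blocks : List Int) (repeat_pattern : List Int) : Prop :=
  0 < num_accesses → (base_addresses_blocks ≠ [] ∧ repeat_pattern ≠ [])
instance (num_accesses : Int) (base_addresses_blocks : List Int) (repeat_pattern : List Int) : Decidable (Pre_generate_temporal_accesses num_accesses base_addresses_blocks repeat_pattern) := by unfold Pre_generate_temporal_accesses; infer_instance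

def pvWitness_generate_temporal_accesses : Int × List Int × List Int := (7, [10, 20, 30], [1, 1, 2, 3])

def Spec_generate_temporal_accesses (num_accesses : Int) (base_addresses_blocks : List Int) (repeat_pattern : List Int) (out : List Int) : Prop := out = generate_temporal_accesses_alt num_accesses base_addresses_blocks repeat_pattern
instance (num_accesses : Int) (base_addresses_blocks : List Int) (repeat_pattern : List Int) (out : List Int) : Decidable (Spec_generate_temporal_accesses num_accesses base_addresses_blocks repeat_pattern out) := by unfold Spec_generate_temporal_accesses; infer_instance

-- ===== CLAIM (what is proved, stated in full; the proofs are below) =====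
def Claim_equal_generate_temporal_accesses : Prop := ∀ (num_accesses : Int) (base_addresses_blocks : List Int) (repeat_pattern : List Int), Dom_generate_temporal_accesses num_accesses base_addresses_blocks repeat_pattern → Pre_generate_temporal_accesses num_accesses base_addresses_blocks repeat_pattern → Spec_generate_temporal_accesses num_accesses base_addresses_blocks repeat_pattern (generate_temporal_accesses num_accesses base_addresses_blocks repeat_pattern)

-- ===== LEMMAS AND PROOFS =====

-- one full period read off by index equals the period list itself
lemma map_range_getD_self (per : List Int) :
    (List.range per.length).map (fun k => per.getD k 0) = per := by
  apply List.ext_getElem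
  · simp
  · intro i h1 h2
    simp [List.getD_eq_getElem?_getD, List.getElem?_eq_getElem h2]

-- a prefix of a period read off by index
lemma map_range_getD_take (per : List Int) (N : Nat) (h : N ≤ per.length) :
    (List.range N).map (fun k => per.getD k 0) = per.take N := by
  apply List.ext_getElem
  · simp [h]
  · intro i h1 h2
    have hi : i < per.length := lt_of_lt_of_le (by simpa using h1) h
    simp [List.getD_eq_getElem?_getD, List.getElem?_eq_getElem hi]

-- the tiling lemma: reading a nonempty list cyclically N times = full copies ++ remainder prefix
lemma tile (per : List Int) (hL : per ≠ []) : ∀ N : Nat,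
    (List.range N).map (fun k => per.getD (k % per.length) 0) =
      (List.replicate (N / per.length) per).flatten ++ per.take (N % per.length) := by
  intro N
  induction N using Nat.strong_induction_on with
  | _ N ih =>
    have hpos : 0 < per.length := List.length_pos_iff.mpr hL
    by_cases hsmall : N < per.length
    · have h0 : N / per.length = 0 := Nat.div_eq_of_lt hsmall
      have h1 : N % per.length = N := Nat.mod_eq_of_lt hsmall
      rw [h0, h1]
      simp only [List.replicate, List.flatten_nil, List.nil_append]
      calc (List.range N).map (fun k => per.getD (k % per.length) 0)
          = (List.range N).map (fun k => per.getD k 0) := by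
            apply List.map_congr_left
            intro k hk
            rw [Nat.mod_eq_of_lt (lt_of_lt_of_le (List.mem_range.mp hk) (le_of_lt hsmall))]
        _ = per.take N := map_range_getD_take per N (le_of_lt hsmall)
    · rw [not_lt] at hsmall
      obtain ⟨M, rfl⟩ : ∃ M, N = per.length + M := ⟨N - per.length, by omega⟩
      have hM : M < per.length + M := by omega
      rw [List.range_add, List.map_append, List.map_map]
      have hfirst : (List.range per.length).map (fun k => per.getD (k % per.length) 0) = per := by
        calc (List.range per.length).map (fun k => per.getD (k % per.length) 0)
            = (List.range per.length).map (fun k => per.getD k 0) := by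
              apply List.map_congr_left
              intro k hk
              rw [Nat.mod_eq_of_lt (List.mem_range.mp hk)]
          _ = per := map_range_getD_self per
      have hsecond : (List.range M).map ((fun k => per.getD (k % per.length) 0) ∘ (fun x => per.length + x)) =
          (List.range M).map (fun k => per.getD (k % per.length) 0) := by
        apply List.map_congr_left
        intro k _
        simp [Function.comp, Nat.add_mod_left]
      rw [hfirst, hsecond, ih M hM]
      have hdiv : (per.length + M) / per.length = M / per.length + 1 := by
        rw [Nat.add_div_left _ hpos]
      have hmod : (per.length + M) % per.length = M % per.length := Nat.add_mod_left _ _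
      rw [hdiv, hmod, List.replicate_succ, List.flatten_cons, List.append_assoc]

-- ===== VERDICT (by name: the statement is the Claim_ definition above) =====
theorem generate_temporal_accesses_spec : Claim_equal_generate_temporal_accesses := by
  intro n base pat _ hpre
  unfold Spec_generate_temporal_accesses generate_temporal_accesses generate_temporal_accesses_alt
  by_cases hn : n ≤ 0
  · simp only [hn, if_pos]
    rw [PySem.List.pyRange_one_eq_nil (by omega)]
    rfl
  · rw [not_le] at hn
    obtain ⟨hbase, hpat⟩ := hpre hn
    simp only [if_neg (by omega : ¬ n ≤ 0)]
    obtain ⟨N, rfl⟩ : ∃ N : Nat, n = (N : Int) := ⟨n.toNat, by omega⟩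
    rw [PySem.List.foldl_append_singleton_eq_map, PySem.List.pyRange_zero, List.nil_append,
        List.map_map]
    set g : Int → Int := fun p => PySem.List.pyGetD base (PySem.Int.mod (p - 1) (base.length : Int)) 0 with hg
    have hper : pat.map g ≠ [] := by simpa using hpat
    have hlen : (pat.map g).length = pat.length := by simp
    have hNat : (PySem.Int.floordiv (N : Int) (pat.length : Int)).toNat = N / pat.length := by
      rw [PySem.Int.floordiv_natCast]; exact Int.toNat_natCast _
    have hRem : (PySem.Int.mod (N : Int) (pat.length : Int)).toNat = N % pat.length := by
      rw [PySem.Int.mod_natCast]; exact Int.toNat_natCast _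
    rw [hNat, hRem, ← hlen, ← tile (pat.map g) hper N]
    apply List.map_congr_left
    intro k _
    have hkL : k % pat.length < pat.length := Nat.mod_lt _ (List.length_pos_iff.mpr hpat)
    simp only [Function.comp, PySem.Int.mod_natCast, PySem.List.pyGetD_natCast, hlen]
    rw [List.getD_eq_getElem _ _ hkL, List.getD_eq_getElem _ _ (by simpa using hkL)]
    simp [hg]
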